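-- pv_equiv track=rewrite | github.com/RyugaXhypeR/aoc | src/day_01.py | part2
-- ===== SOURCE A (Python) =====
-- UNIQUE_TABLE = {
--     "o": ("one",),
--     "t": ("two", "three"),
--     "f": ("four", "five"),
--     "s": ("six", "seven"),
--     "e": ("eight",),
--     "n": ("nine",),
-- }
--
-- DIG_TABLE = {
--     "one": "1",
--     "two": "2",
--     "three": "3",
--     "four": "4",
--     "five": "5",
--     "six": "6",
--     "seven": "7",
--     "eight": "8",
--     "nine": "9",
-- }
--
-- def part2(inp):
--     sums = 0
--     for ln in inp:
--         i = 0
--         sbuf = ""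
--         while i < len(ln):
--             if ln[i].isdigit():
--                 sbuf += ln[i]
--                 i += 1
--                 continue
--             for d in UNIQUE_TABLE.get(ln[i], []):
--                 if ln[i: i + len(d)] == d:
--                     sbuf += DIG_TABLE[d]
--                     i += len(d) - 1
--                     break
--             else:
--                 i += 1
--         sums += int(sbuf[0] + sbuf[-1])
--     return sums
-- ===== SOURCE B (Python) =====
-- WORDS = [("one", 1), ("two", 2), ("three", 3), ("four", 4), ("five", 5),
--          ("six", 6), ("seven", 7), ("eight", 8), ("nine", 9)]
--
--
-- def digit_at(ln, i):
--     """Digit value readable at position i, or None."""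
--     c = ln[i]
--     if c.isdigit():
--         return int(c)
--     for w, v in WORDS:
--         if ln.startswith(w, i):
--             return v
--     return None
--
--
-- def part2(inp):
--     total = 0
--     for ln in inp:
--         n = len(ln)
--         first = last = None
--         for i in range(n):
--             d = digit_at(ln, i)
--             if d is not None:
--                 first = d
--                 break
--         for i in range(n - 1, -1, -1):
--             d = digit_at(ln, i)
--             if d is not None:
--                 last = d
--                 break
--         total += 10 * first + last
--     return total
-- ===== Notes on version B (the rewrite author's own statement) =====
-- stated objective: alternative
-- what changed: Instead of building a full buffer of every calibration digit per line (with the word-overlap skip i+=len(d)-1), B finds only the first digit by a left-to-right scan and the last digit by a right-to-left scan over positions, checking at each position for a digit character or a spelled-word prefix, and sums 10*first+last; correctness rests on the fact that no spelled digit starts strictly inside another occurrence.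
import Mathlib
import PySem

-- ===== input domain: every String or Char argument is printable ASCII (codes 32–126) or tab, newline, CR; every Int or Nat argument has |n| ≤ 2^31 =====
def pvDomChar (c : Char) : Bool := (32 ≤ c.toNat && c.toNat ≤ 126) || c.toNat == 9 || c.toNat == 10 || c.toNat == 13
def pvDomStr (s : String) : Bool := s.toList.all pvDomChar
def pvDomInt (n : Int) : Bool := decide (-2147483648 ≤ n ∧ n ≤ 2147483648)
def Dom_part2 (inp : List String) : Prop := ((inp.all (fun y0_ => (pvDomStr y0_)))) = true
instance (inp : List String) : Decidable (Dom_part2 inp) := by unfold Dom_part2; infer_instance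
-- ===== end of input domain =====

-- B replaces A's full per-line digit buffer by two directional scans that find only the
-- first and the last readable digit of each line (objective: alternative decomposition).


-- ===== PORT A =====
-- UNIQUE_TABLE.get(ln[i], []) as a function on the key character (dict with literal keys)
def wordsOf (c : Char) : List (List Char) :=
  if c = 'o' then [['o','n','e']]
  else if c = 't' then [['t','w','o'], ['t','h','r','e','e']]
  else if c = 'f' then [['f','o','u','r'], ['f','i','v','e']]
  else if c = 's' then [['s','i','x'], ['s','e','v','e','n']]
  else if c = 'e' then [['e','i','g','h','t']]
  else if c = 'n' then [['n','i','n','e']]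
  else []

-- DIG_TABLE[d] (total lookup: every d passed in is a key)
def digOf (d : List Char) : Char :=
  if d = ['o','n','e'] then '1' else if d = ['t','w','o'] then '2'
  else if d = ['t','h','r','e','e'] then '3' else if d = ['f','o','u','r'] then '4'
  else if d = ['f','i','v','e'] then '5' else if d = ['s','i','x'] then '6'
  else if d = ['s','e','v','e','n'] then '7' else if d = ['e','i','g','h','t'] then '8'
  else '9'

-- every word in UNIQUE_TABLE has length ≥ 3 (used only for termination of loopA)
theorem wordsOf_len {c : Char} {d : List Char} (h : d ∈ wordsOf c) : 3 ≤ d.length := by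
  unfold wordsOf at h
  split_ifs at h <;> simp_all <;> rcases h with h | h <;> simp [h]

-- the while-loop of A: state (i, sbuf)
def loopA (s : List Char) (i : Nat) (sbuf : List Char) : List Char :=
  if _h : i < s.length then
    if PySem.Chars.isdigit s[i] then loopA s (i + 1) (sbuf ++ [s[i]])
    else
      match hf : (wordsOf s[i]).find?
          (fun d => PySem.List.slice s (some (i : Int)) (some ((i : Int) + d.length)) == d) with
      | some d => loopA s (i + (d.length - 1)) (sbuf ++ [digOf d])
      | none => loopA s (i + 1) sbuf
  else sbuf
termination_by s.length - i
decreasing_by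
  · omega
  · have := wordsOf_len (List.mem_of_find?_eq_some hf); omega
  · omega

def lineA (ln : String) : Int :=
  let sbuf := loopA ln.toList 0 []
  match PySem.List.pyGet? sbuf (0 : Int), PySem.List.pyGet? sbuf (-1 : Int) with
  | some a, some b => (PySem.Int.ofChars? [a, b]).getD 0   -- int(sbuf[0] + sbuf[-1])
  | _, _ => 0                                              -- IndexError: excluded by Pre_

def part2 (inp : List String) : Int :=
  inp.foldl (fun sums ln => sums + lineA ln) 0

-- ===== PORT B =====
def wordsB : List (List Char × Int) :=
  [(['o','n','e'], 1), (['t','w','o'], 2), (['t','h','r','e','e'], 3),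
   (['f','o','u','r'], 4), (['f','i','v','e'], 5), (['s','i','x'], 6),
   (['s','e','v','e','n'], 7), (['e','i','g','h','t'], 8), (['n','i','n','e'], 9)]

def digitAt (s : List Char) (i : Nat) : Option Int :=
  if _h : i < s.length then
    if PySem.Chars.isdigit s[i] then some ((PySem.Int.ofChars? [s[i]]).getD 0)   -- int(c)
    else (wordsB.find? (fun p => PySem.Chars.startswith (s.drop i) p.1)).map Prod.snd
  else none

def scanL (s : List Char) (i : Nat) : Option Int :=
  if _h : i < s.length then
    match digitAt s i with
    | some d => some d
    | none => scanL s (i + 1)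
  else none
termination_by s.length - i

def scanR (s : List Char) (i : Nat) : Option Int :=
  match digitAt s i with
  | some d => some d
  | none => if i = 0 then none else scanR s (i - 1)

def lineB (ln : String) : Int :=
  let s := ln.toList
  let first := scanL s 0
  let last := if s.length = 0 then none else scanR s (s.length - 1)
  10 * first.getD 0 + last.getD 0   -- None here = TypeError in Python: excluded by Pre_

def part2_alt (inp : List String) : Int :=
  inp.foldl (fun total ln => total + lineB ln) 0

-- ===== PRECONDITION & SPEC =====
-- Pre_ excludes exactly the inputs containing a line with no digit character and no spelled
-- digit word, on which A raises IndexError (sbuf[0] of an empty buffer); B also raises there.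
def Pre_part2 (inp : List String) : Prop :=
  ∀ ln ∈ inp, ∃ i < ln.toList.length,
    PySem.Chars.isdigit (ln.toList.getD i ' ') = true ∨
    ∃ w ∈ [['o','n','e'], ['t','w','o'], ['t','h','r','e','e'], ['f','o','u','r'],
           ['f','i','v','e'], ['s','i','x'], ['s','e','v','e','n'], ['e','i','g','h','t'],
           ['n','i','n','e']], w <+: ln.toList.drop i
instance (inp : List String) : Decidable (Pre_part2 inp) := by unfold Pre_part2; infer_instance

def pvWitness_part2 : List String := ["two1nine", "x8y"]

def Spec_part2 (inp : List String) (out : Int) : Prop := out = part2_alt inp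
instance (inp : List String) (out : Int) : Decidable (Spec_part2 inp out) := by unfold Spec_part2; infer_instance

-- ===== CLAIM (what is proved, stated in full; the proofs are below) =====
def Claim_equal_part2 : Prop := ∀ (inp : List String), Dom_part2 inp → Pre_part2 inp → Spec_part2 inp (part2 inp)


-- ===== LEMMAS AND PROOFS =====

-- proof-side vocabulary ----------------------------------------------------
def valC (c : Char) : Int := (c.toNat : Int) - 48

def WL : List (List Char) :=
  [['o','n','e'], ['t','w','o'], ['t','h','r','e','e'], ['f','o','u','r'],
   ['f','i','v','e'], ['s','i','x'], ['s','e','v','e','n'], ['e','i','g','h','t'],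
   ['n','i','n','e']]

def digitList : List Char := ['0','1','2','3','4','5','6','7','8','9']

-- the digit character readable at position i (digit char, else spelled word)
def charAt? (s : List Char) (i : Nat) : Option Char :=
  if _h : i < s.length then
    if PySem.Chars.isdigit s[i] then some s[i]
    else (WL.find? (fun d => d.isPrefixOf (s.drop i))).map digOf
  else none

-- the list of all digit characters readable from position i on
def digits (s : List Char) (i : Nat) : List Char :=
  if _h : i < s.length then
    match charAt? s i with
    | some c => c :: digits s (i + 1)
    | none => digits s (i + 1)
  else []
termination_by s.length - i

-- generic find? helpers ----------------------------------------------------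
theorem find?_congr' {a : Type} (l : List a) (p q : a → Bool)
    (h : ∀ x ∈ l, p x = q x) : l.find? p = l.find? q := by
  induction l with
  | nil => rfl
  | cons x xs ih =>
      simp only [List.find?]
      rw [h x (by simp)]
      cases hq : q x
      · exact ih (fun y hy => h y (by simp [hy]))
      · rfl

theorem find?_filter' {a : Type} (l : List a) (p q : a → Bool)
    (h : ∀ x ∈ l, p x = true → q x = true) : (l.filter q).find? p = l.find? p := by
  induction l with
  | nil => rfl
  | cons x xs ih =>
      by_cases hq : q x = true
      · rw [List.filter_cons_of_pos hq]
        cases hp : p x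
        · rw [List.find?_cons_of_neg (by simp [hp]), List.find?_cons_of_neg (by simp [hp])]
          exact ih (fun y hy => h y (by simp [hy]))
        · rw [List.find?_cons_of_pos hp, List.find?_cons_of_pos hp]
      · have hp : p x = false := by
          cases hpx : p x
          · rfl
          · exact absurd (h x (by simp) hpx) hq
        rw [List.filter_cons_of_neg (by simp [hq]), List.find?_cons_of_neg (by simp [hp])]
        exact ih (fun y hy => h y (by simp [hy]))

-- character facts -----------------------------------------------------------
theorem mem_digitList {c : Char} (h : PySem.Chars.isdigit c = true) : c ∈ digitList := by
  simp [PySem.Chars.isdigit, Char.le_def] at h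
  obtain ⟨h1, h2⟩ := h
  have hc : Char.ofNat c.toNat = c := Char.ofNat_toNat c
  have h1' : 48 ≤ c.toNat := h1
  have h2' : c.toNat ≤ 57 := h2
  have key : ∀ n < 58, 48 ≤ n → Char.ofNat n ∈ digitList := by decide
  rw [← hc]
  exact key c.toNat (by omega) (by omega)

theorem take_beq_eq_isPrefixOf (d x : List Char) :
    (x.take d.length == d) = d.isPrefixOf x := by
  by_cases h : d <+: x
  · have ht : d = x.take d.length := List.prefix_iff_eq_take.mp h
    simp [List.isPrefixOf_iff_prefix, h, ← ht]
  · have l1 : (x.take d.length == d) = false := by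
      rw [beq_eq_false_iff_ne]
      exact fun hc => h (List.prefix_iff_eq_take.mpr hc.symm)
    have l2 : d.isPrefixOf x = false := by
      rw [← Bool.not_eq_true, List.isPrefixOf_iff_prefix]; exact h
    rw [l1, l2]

-- A's slice comparison is a prefix test
theorem sliceTest_eq (s : List Char) (i : Nat) (d : List Char) :
    (PySem.List.slice s (some (i : Int)) (some ((i : Int) + d.length)) == d)
      = d.isPrefixOf (s.drop i) := by
  rw [PySem.List.slice_toNat s (by positivity) (by positivity)]
  have h1 : ((i : Int) + d.length).toNat - (i : Int).toNat = d.length := by omega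
  rw [h1, Int.toNat_natCast]
  exact take_beq_eq_isPrefixOf d (s.drop i)

-- word facts, each obtained from one boolean evaluation over the word list --
theorem WL_chars_not_digit_bool :
    WL.all (fun d => d.all (fun c => !PySem.Chars.isdigit c)) = true := by rfl

theorem WL_chars_not_digit : ∀ d ∈ WL, ∀ c ∈ d, PySem.Chars.isdigit c = false := by
  intro d hd c hc
  have := List.all_eq_true.mp (List.all_eq_true.mp WL_chars_not_digit_bool d hd) c hc
  simpa using this

theorem WL_dig_digit_bool : WL.all (fun d => PySem.Chars.isdigit (digOf d)) = true := by rfl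

theorem WL_dig_digit : ∀ d ∈ WL, PySem.Chars.isdigit (digOf d) = true := by
  intro d hd
  exact List.all_eq_true.mp WL_dig_digit_bool d hd

theorem WL_len_bool : WL.all (fun d => decide (3 ≤ d.length)) = true := by rfl

theorem WL_len : ∀ d ∈ WL, 3 ≤ d.length := by
  intro d hd
  exact of_decide_eq_true (List.all_eq_true.mp WL_len_bool d hd)

theorem WL_head_bool :
    WL.all (fun d => d.headD ' ' ∈ (['o','t','f','s','e','n'] : List Char)) = true := by rfl

theorem WL_head : ∀ d ∈ WL, d.headD ' ' ∈ (['o','t','f','s','e','n'] : List Char) := by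
  intro d hd
  simpa using List.all_eq_true.mp WL_head_bool d hd

theorem WL_ne_nil_bool : WL.all (fun d => !d.isEmpty) = true := by rfl

theorem WL_ne_nil : ∀ d ∈ WL, d ≠ [] := by
  intro d hd
  have := List.all_eq_true.mp WL_ne_nil_bool d hd
  simpa [List.isEmpty_iff] using this

theorem WL_no_overlap_bool :
    WL.all (fun d => WL.all (fun e => (List.range d.length).all (fun k =>
      !(decide (1 ≤ k) && decide (k + 2 ≤ d.length)) ||
      (!(e.isPrefixOf (d.drop k)) && !((d.drop k).isPrefixOf e))))) = true := by rfl

theorem WL_no_overlap : ∀ d ∈ WL, ∀ e ∈ WL, ∀ k, k < d.length → 1 ≤ k → k + 2 ≤ d.length →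
    ¬ (e <+: d.drop k) ∧ ¬ (d.drop k <+: e) := by
  intro d hd e he k hk h1 h2
  have := List.all_eq_true.mp (List.all_eq_true.mp
    (List.all_eq_true.mp WL_no_overlap_bool d hd) e he) k (List.mem_range.mpr hk)
  simp only [h1, h2, decide_true, Bool.and_self, Bool.not_true, Bool.false_or,
    Bool.and_eq_true, Bool.not_eq_true'] at this
  constructor
  · intro hc; rw [← List.isPrefixOf_iff_prefix] at hc; rw [this.1] at hc; exact Bool.false_ne_true hc
  · intro hc; rw [← List.isPrefixOf_iff_prefix] at hc; rw [this.2] at hc; exact Bool.false_ne_true hc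

-- UNIQUE_TABLE.get c is the first-letter filter of the word list
theorem wordsOf_eq_filter (c : Char) :
    wordsOf c = WL.filter (fun d => d.headD ' ' == c) := by
  unfold wordsOf
  split_ifs with h1 h2 h3 h4 h5 h6 <;> subst_vars <;> try decide
  rw [Eq.comm, List.filter_eq_nil_iff]
  intro d hd
  have hh := WL_head d hd
  simp only [List.mem_cons, List.not_mem_nil, or_false] at hh
  simp only [beq_iff_eq]
  intro hc
  rcases hh with h | h | h | h | h | h <;> rw [h] at hc <;> subst hc <;> simp_all

-- a word matching at i starts with s[i]
theorem head_of_prefix {s : List Char} {i : Nat} (hi : i < s.length) :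
    ∀ d ∈ WL, d.isPrefixOf (s.drop i) = true → (d.headD ' ' == s[i]) = true := by
  intro d hd hp
  rw [List.isPrefixOf_iff_prefix] at hp
  have hne : d ≠ [] := WL_ne_nil d hd
  obtain ⟨a, t, rfl⟩ := List.exists_cons_of_ne_nil hne
  obtain ⟨r, hr⟩ := hp
  have : (s.drop i).head? = some a := by rw [← hr]; rfl
  rw [List.head?_drop, List.getElem?_eq_getElem hi] at this
  simp at this
  simp [this]

-- A's find? over UNIQUE_TABLE equals the find? over the full word list
theorem findA_eq (s : List Char) (i : Nat) (hi : i < s.length) :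
    (wordsOf s[i]).find?
        (fun d => PySem.List.slice s (some (i : Int)) (some ((i : Int) + d.length)) == d)
      = WL.find? (fun d => d.isPrefixOf (s.drop i)) := by
  rw [find?_congr' _ _ (fun d => d.isPrefixOf (s.drop i)) (fun d _ => sliceTest_eq s i d)]
  rw [wordsOf_eq_filter]
  exact find?_filter' WL _ _ (head_of_prefix hi)

-- B's digitAt is charAt? mapped through valC
theorem int_single_bool :
    digitList.all (fun c => (PySem.Int.ofChars? [c]).getD 0 == valC c) = true := by rfl

theorem int_single : ∀ c ∈ digitList, (PySem.Int.ofChars? [c]).getD 0 = valC c := by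
  intro c hc
  have := List.all_eq_true.mp int_single_bool c hc
  exact beq_iff_eq.mp this

theorem wordsB_snd_bool : wordsB.all (fun q => q.2 == valC (digOf q.1)) = true := by rfl

theorem wordsB_snd : ∀ q ∈ wordsB, q.2 = valC (digOf q.1) := by
  intro q hq
  exact beq_iff_eq.mp (List.all_eq_true.mp wordsB_snd_bool q hq)

theorem digitAt_eq (s : List Char) (i : Nat) :
    digitAt s i = (charAt? s i).map valC := by
  unfold digitAt charAt?
  by_cases hi : i < s.length
  · rw [dif_pos hi, dif_pos hi]
    by_cases hd : PySem.Chars.isdigit s[i] = true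
    · rw [if_pos hd, if_pos hd, int_single s[i] (mem_digitList hd), Option.map_some]
    · rw [if_neg hd, if_neg hd]
      have hmap : WL.find? (fun d => d.isPrefixOf (s.drop i))
          = (wordsB.find? (fun q => q.1.isPrefixOf (s.drop i))).map Prod.fst := by
        have hWL : WL = wordsB.map Prod.fst := rfl
        rw [hWL, List.find?_map]; rfl
      have hsw : (fun q : List Char × Int => PySem.Chars.startswith (s.drop i) q.1)
          = (fun q : List Char × Int => q.1.isPrefixOf (s.drop i)) := by
        funext q
        rw [Bool.eq_iff_iff, PySem.Chars.startswith_iff, List.isPrefixOf_iff_prefix]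
      rw [hsw, hmap]
      cases hf : wordsB.find? (fun q => q.1.isPrefixOf (s.drop i)) with
      | none => rfl
      | some q =>
          simp only [Option.map_some]
          rw [wordsB_snd q (List.mem_of_find?_eq_some hf)]
  · rw [dif_neg hi, dif_neg hi]; rfl

-- no digit is readable strictly inside a matched word (before its last letter)
theorem no_overlap {s : List Char} {i j : Nat} {d : List Char}
    (hd : d ∈ WL) (hp : d <+: s.drop i) (hij : i < j) (hj : j + 1 < i + d.length) :
    charAt? s j = none := by
  obtain ⟨t, ht⟩ := hp
  have hlen : d.length + t.length = s.length - i := by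
    have := congrArg List.length ht; simpa using this
  have hjlt : j < s.length := by omega
  set k := j - i with hk
  have hdropj : s.drop j = d.drop k ++ t := by
    have h1 : s.drop j = (s.drop i).drop k := by rw [List.drop_drop]; congr 1; omega
    rw [h1, ← ht, List.drop_append]
    have : k - d.length = 0 := by omega
    rw [this, List.drop_zero]
  have hkd : k < d.length := by omega
  have hdk_ne : d.drop k ≠ [] := by
    intro hc; have := congrArg List.length hc; simp at this; omega
  have hsj : s[j] ∈ d := by
    have h1 : (s.drop j).head? = some s[j] := by
      rw [List.head?_drop, List.getElem?_eq_getElem hjlt]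
    rw [hdropj] at h1
    obtain ⟨a, u, hau⟩ := List.exists_cons_of_ne_nil hdk_ne
    rw [hau] at h1
    simp at h1
    rw [← h1]
    exact List.mem_of_mem_drop (by rw [hau]; simp)
  have hnd : PySem.Chars.isdigit s[j] = false := WL_chars_not_digit d hd s[j] hsj
  unfold charAt?
  simp only [hjlt, dif_pos, hnd, Bool.false_eq_true, if_neg, not_false_iff]
  rw [List.find?_eq_none.mpr]
  · rfl
  · intro e he hpe
    rw [List.isPrefixOf_iff_prefix] at hpe
    rw [hdropj] at hpe
    have h2 : d.drop k <+: d.drop k ++ t := List.prefix_append _ _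
    have h3 := List.prefix_or_prefix_of_prefix hpe h2
    have h4 := WL_no_overlap d hd e he k hkd (by omega) (by omega)
    rcases h3 with h | h
    · exact h4.1 h
    · exact h4.2 h

-- skipping positions with no readable digit does not change digits ----------
theorem digits_none_step {s : List Char} {a : Nat} (h : charAt? s a = none) :
    digits s a = digits s (a + 1) := by
  by_cases ha : a < s.length
  · rw [digits]; simp [ha, h]
  · rw [digits, digits]; simp [ha]; intro hc; omega

theorem digits_skip {s : List Char} (a b : Nat) (hab : a ≤ b)
    (h : ∀ j, a ≤ j → j < b → charAt? s j = none) : digits s a = digits s b := by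
  induction b with
  | zero =>
      have : a = 0 := by omega
      rw [this]
  | succ n ih =>
      by_cases hab' : a = n + 1
      · rw [hab']
      · have h1 : digits s a = digits s n :=
          ih (by omega) (fun j hj1 hj2 => h j hj1 (by omega))
        rw [h1, digits_none_step (h n (by omega) (by omega))]

-- the main loop of A computes digits --------------------------------------
theorem loopA_digits : ∀ n s i sbuf, s.length - i ≤ n →
    loopA s i sbuf = sbuf ++ digits s i := by
  intro n
  induction n with
  | zero =>
      intro s i sbuf h
      have hi : ¬ i < s.length := by omega
      rw [loopA, digits]; simp [hi]
  | succ n ih =>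
      intro s i sbuf h
      by_cases hi : i < s.length
      · rw [loopA, digits]
        simp only [hi, dif_pos]
        by_cases hd : PySem.Chars.isdigit s[i] = true
        · rw [if_pos hd]
          have hc : charAt? s i = some s[i] := by unfold charAt?; rw [dif_pos hi, if_pos hd]
          rw [hc, ih s (i + 1) _ (by omega)]
          simp
        · rw [if_neg hd]
          have hc : charAt? s i
              = (WL.find? (fun d => d.isPrefixOf (s.drop i))).map digOf := by
            unfold charAt?; rw [dif_pos hi, if_neg hd]
          rw [findA_eq s i hi] at *
          cases hf : WL.find? (fun d => d.isPrefixOf (s.drop i)) with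
          | none =>
              rw [hc, hf]
              simp only [Option.map_none]
              exact ih s (i + 1) sbuf (by omega)
          | some d =>
              have hdW : d ∈ WL := List.mem_of_find?_eq_some hf
              have hdp : d.isPrefixOf (s.drop i) = true := by
                have := List.find?_some hf; simpa using this
              have hd3 : 3 ≤ d.length := WL_len d hdW
              rw [hc, hf]
              simp only [Option.map_some]
              rw [ih s (i + (d.length - 1)) _ (by omega)]
              have hskip : digits s (i + 1) = digits s (i + (d.length - 1)) := by
                apply digits_skip _ _ (by omega)
                intro j hj1 hj2
                exact no_overlap hdW (by rw [← List.isPrefixOf_iff_prefix]; exact hdp)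
                  (by omega) (by omega)
              rw [← hskip]; simp
      · rw [loopA, digits]; simp [hi]

-- digits as a filterMap over all positions ---------------------------------
theorem digits_eq_filterMap : ∀ n s i, s.length - i ≤ n →
    digits s i = (List.range' i (s.length - i)).filterMap (fun j => charAt? s j) := by
  intro n
  induction n with
  | zero =>
      intro s i h
      have hi : ¬ i < s.length := by omega
      have : s.length - i = 0 := by omega
      rw [digits, this]; simp [hi]
  | succ n ih =>
      intro s i h
      by_cases hi : i < s.length
      · have hlen : s.length - i = (s.length - (i + 1)) + 1 := by omega
        rw [hlen, List.range'_succ]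
        rw [digits]
        simp only [hi, dif_pos, List.filterMap_cons]
        cases hc : charAt? s i with
        | none => simp [ih s (i + 1) (by omega)]
        | some c => simp [ih s (i + 1) (by omega)]
      · have : s.length - i = 0 := by omega
        rw [digits, this]; simp [hi]

-- B's scans ----------------------------------------------------------------
theorem scanL_eq : ∀ n s i, s.length - i ≤ n →
    scanL s i = (digits s i).head?.map valC := by
  intro n
  induction n with
  | zero =>
      intro s i h
      have hi : ¬ i < s.length := by omega
      rw [scanL, digits]; simp [hi]
  | succ n ih =>
      intro s i h
      by_cases hi : i < s.length
      · rw [scanL, digits]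
        simp only [hi, dif_pos]
        rw [digitAt_eq]
        cases hc : charAt? s i with
        | none => simp [ih s (i + 1) (by omega)]
        | some c => simp
      · rw [scanL, digits]; simp [hi]

theorem scanR_eq (s : List Char) : ∀ i,
    scanR s i = ((List.range (i + 1)).filterMap (fun j => charAt? s j)).getLast?.map valC := by
  intro i
  induction i with
  | zero =>
      rw [scanR, digitAt_eq]
      cases hc : charAt? s 0 with
      | none =>
          simp only [Option.map_none, List.range_succ, List.range_zero, List.nil_append,
            List.filterMap_cons, hc, List.filterMap_nil]
          rfl
      | some c =>
          simp only [Option.map_some, List.range_succ, List.range_zero, List.nil_append,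
            List.filterMap_cons, hc, List.filterMap_nil, List.getLast?_singleton]
  | succ n ih =>
      rw [scanR, digitAt_eq, List.range_succ, List.filterMap_append]
      cases hc : charAt? s (n + 1) with
      | none =>
          simp only [Option.map_none, List.filterMap_cons, hc, List.filterMap_nil,
            List.append_nil]
          rw [← ih]
          rfl
      | some c =>
          simp only [Option.map_some, List.filterMap_cons, hc, List.filterMap_nil,
            List.getLast?_concat]

-- every readable digit is a digit character --------------------------------
theorem charAt?_digit {s : List Char} {j : Nat} {c : Char} (h : charAt? s j = some c) :
    PySem.Chars.isdigit c = true := by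
  unfold charAt? at h
  by_cases hj : j < s.length
  · rw [dif_pos hj] at h
    by_cases hd : PySem.Chars.isdigit s[j] = true
    · rw [if_pos hd, Option.some_inj] at h; rw [← h]; exact hd
    · rw [if_neg hd] at h
      cases hf : WL.find? (fun d => d.isPrefixOf (s.drop j)) with
      | none => rw [hf] at h; simp at h
      | some d =>
          rw [hf] at h
          simp at h
          rw [← h]
          exact WL_dig_digit d (List.mem_of_find?_eq_some hf)
  · rw [dif_neg hj] at h; exact absurd h (by simp)

theorem digits_all : ∀ n s i, s.length - i ≤ n →
    ∀ c ∈ digits s i, PySem.Chars.isdigit c = true := by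
  intro n
  induction n with
  | zero =>
      intro s i h c hc
      have hi : ¬ i < s.length := by omega
      rw [digits] at hc; simp [hi] at hc
  | succ n ih =>
      intro s i h c hc
      by_cases hi : i < s.length
      · rw [digits] at hc
        simp only [hi, dif_pos] at hc
        cases hca : charAt? s i with
        | none => rw [hca] at hc; exact ih s (i + 1) (by omega) c hc
        | some c' =>
            rw [hca] at hc
            rcases List.mem_cons.mp hc with h1 | h1
            · rw [h1]; exact charAt?_digit hca
            · exact ih s (i + 1) (by omega) c h1
      · rw [digits] at hc; simp [hi] at hc

-- int() of two digit characters --------------------------------------------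
theorem int_two_bool : digitList.all (fun a => digitList.all (fun b =>
    (PySem.Int.ofChars? [a, b]).getD 0 == 10 * valC a + valC b)) = true := by rfl

theorem int_two : ∀ a ∈ digitList, ∀ b ∈ digitList,
    (PySem.Int.ofChars? [a, b]).getD 0 = 10 * valC a + valC b := by
  intro a ha b hb
  exact beq_iff_eq.mp (List.all_eq_true.mp (List.all_eq_true.mp int_two_bool a ha) b hb)

-- a line satisfying Pre_'s condition has a nonempty digits list -------------
theorem digits_ne_nil {s : List Char} {i : Nat} (hi : i < s.length)
    (h : PySem.Chars.isdigit (s.getD i ' ') = true ∨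
      ∃ w ∈ [['o','n','e'], ['t','w','o'], ['t','h','r','e','e'], ['f','o','u','r'],
             ['f','i','v','e'], ['s','i','x'], ['s','e','v','e','n'], ['e','i','g','h','t'],
             ['n','i','n','e']], w <+: s.drop i) :
    digits s 0 ≠ [] := by
  have hci : charAt? s i ≠ none := by
    unfold charAt?
    rw [dif_pos hi]
    rcases h with h | ⟨w, hw, hwp⟩
    · rw [List.getD_eq_getElem s ' ' hi] at h
      rw [if_pos h]; simp
    · by_cases hd : PySem.Chars.isdigit s[i] = true
      · rw [if_pos hd]; simp
      · rw [if_neg hd]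
        have : (WL.find? (fun d => d.isPrefixOf (s.drop i))).isSome := by
          rw [List.find?_isSome]
          exact ⟨w, hw, by rw [List.isPrefixOf_iff_prefix]; exact hwp⟩
        cases hf : WL.find? (fun d => d.isPrefixOf (s.drop i))
        · rw [hf] at this; simp at this
        · simp
  cases hc : charAt? s i with
  | none => exact absurd hc hci
  | some c =>
      have hmem : c ∈ digits s 0 := by
        rw [digits_eq_filterMap (s.length) s 0 (by omega)]
        exact List.mem_filterMap.mpr ⟨i, by simp [List.mem_range'_1]; omega, hc⟩
      exact List.ne_nil_of_mem hmem

-- per-line agreement --------------------------------------------------------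
theorem line_eq (ln : String)
    (h : ∃ i < ln.toList.length,
      PySem.Chars.isdigit (ln.toList.getD i ' ') = true ∨
      ∃ w ∈ [['o','n','e'], ['t','w','o'], ['t','h','r','e','e'], ['f','o','u','r'],
             ['f','i','v','e'], ['s','i','x'], ['s','e','v','e','n'], ['e','i','g','h','t'],
             ['n','i','n','e']], w <+: ln.toList.drop i) :
    lineA ln = lineB ln := by
  obtain ⟨i, hi, hcond⟩ := h
  set s := ln.toList with hs
  have hD : digits s 0 ≠ [] := digits_ne_nil hi hcond
  have hlen : s.length ≠ 0 := by intro hc; rw [List.length_eq_zero_iff] at hc; rw [hc] at hD; rw [digits] at hD; simp at hD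
  obtain ⟨a, ha⟩ := Option.isSome_iff_exists.mp (by rwa [Option.isSome_iff_ne_none, Ne, List.head?_eq_none_iff] : (digits s 0).head?.isSome)
  obtain ⟨b, hb⟩ := Option.isSome_iff_exists.mp (by rwa [Option.isSome_iff_ne_none, Ne, List.getLast?_eq_none_iff] : (digits s 0).getLast?.isSome)
  have haD : a ∈ digits s 0 := List.mem_of_mem_head? ha
  have hbD : b ∈ digits s 0 := List.mem_of_mem_getLast? hb
  have hadig := digits_all s.length s 0 (by omega) a haD
  have hbdig := digits_all s.length s 0 (by omega) b hbD
  have hloop : loopA s 0 [] = digits s 0 := by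
    rw [loopA_digits s.length s 0 [] (by omega)]; simp
  unfold lineA lineB
  simp only [← hs, hloop]
  rw [PySem.List.pyGet?_zero, PySem.List.pyGet?_neg_one, ← List.head?_eq_getElem?, ha, hb]
  show (PySem.Int.ofChars? [a, b]).getD 0 = _
  rw [int_two a (mem_digitList hadig) b (mem_digitList hbdig)]
  rw [scanL_eq s.length s 0 (by omega), ha]
  have hr : List.range ((s.length - 1) + 1) = List.range' 0 (s.length - 0) := by
    rw [List.range_eq_range']; congr 1; omega
  rw [scanR_eq s (s.length - 1), hr, ← digits_eq_filterMap s.length s 0 (by omega), hb]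
  simp [hlen]


-- ===== VERDICT (by name: the statement is the Claim_ definition above) =====
theorem part2_spec : Claim_equal_part2 := by
  intro inp _dom hpre
  unfold Spec_part2 part2 part2_alt
  have aux : ∀ (l : List String) (hl : ∀ ln ∈ l, ∃ i < ln.toList.length,
      PySem.Chars.isdigit (ln.toList.getD i ' ') = true ∨
      ∃ w ∈ [['o','n','e'], ['t','w','o'], ['t','h','r','e','e'], ['f','o','u','r'],
             ['f','i','v','e'], ['s','i','x'], ['s','e','v','e','n'], ['e','i','g','h','t'],
             ['n','i','n','e']], w <+: ln.toList.drop i) (acc : Int),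
      l.foldl (fun sums ln => sums + lineA ln) acc
        = l.foldl (fun total ln => total + lineB ln) acc := by
    intro l
    induction l with
    | nil => intro _ _; rfl
    | cons x xs ih =>
        intro hl acc
        simp only [List.foldl_cons]
        rw [line_eq x (hl x (by simp))]
        exact ih (fun ln hln => hl ln (by simp [hln])) _
  exact aux inp hpre 0
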